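-- pv_equiv track=rewrite | github.com/Givs/solucao_selecao_pedidos | main.py | verifica_capacidade
-- ===== SOURCE A (Python) =====
-- def verifica_capacidade(assignment, pedidos, corredores):
--     """
--     Verifica se os corredores selecionados (variáveis com prefixo 'c')
--     possuem capacidade suficiente para atender à demanda dos pedidos selecionados.
--
--     Retorna:
--         True se a restrição for satisfeita; caso contrário, False.
--     """
--     itens = set()
--     # Coleta todos os itens dos pedidos
--     for o in pedidos:
--         itens.update(pedidos[o].keys())
--     # Para cada item, verifica se a soma da demanda dos pedidos selecionados
--     # é menor ou igual à soma da oferta dos corredores selecionados.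
--     for item in itens:
--         demanda = sum(pedidos[o].get(item, 0) for o in pedidos if assignment.get(f"o{o}", 0) == 1)
--         oferta = sum(corredores[c].get(item, 0) for c in corredores if assignment.get(f"c{c}", 0) == 1)
--         if demanda > oferta:
--             return False
--     return True
-- ===== SOURCE B (Python) =====
-- def verifica_capacidade(assignment, pedidos, corredores):
--     """Single-pass: accumulate demand/offer dicts once, then compare per item."""
--     itens = set()
--     demanda = {}
--     for o, its in pedidos.items():
--         itens.update(its)
--         if assignment.get(f"o{o}", 0) == 1:
--             for item, q in its.items():
--                 demanda[item] = demanda.get(item, 0) + q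
--     oferta = {}
--     for c, its in corredores.items():
--         if assignment.get(f"c{c}", 0) == 1:
--             for item, q in its.items():
--                 oferta[item] = oferta.get(item, 0) + q
--     return all(demanda.get(i, 0) <= oferta.get(i, 0) for i in itens)
-- ===== Notes on version B (the rewrite author's own statement) =====
-- stated objective: faster
-- what changed: Instead of rescanning all orders and all corridors once per distinct item, B makes one pass over pedidos and one over corredores, accumulating demand and offer dictionaries, then compares the two dictionaries per item.
import Mathlib
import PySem

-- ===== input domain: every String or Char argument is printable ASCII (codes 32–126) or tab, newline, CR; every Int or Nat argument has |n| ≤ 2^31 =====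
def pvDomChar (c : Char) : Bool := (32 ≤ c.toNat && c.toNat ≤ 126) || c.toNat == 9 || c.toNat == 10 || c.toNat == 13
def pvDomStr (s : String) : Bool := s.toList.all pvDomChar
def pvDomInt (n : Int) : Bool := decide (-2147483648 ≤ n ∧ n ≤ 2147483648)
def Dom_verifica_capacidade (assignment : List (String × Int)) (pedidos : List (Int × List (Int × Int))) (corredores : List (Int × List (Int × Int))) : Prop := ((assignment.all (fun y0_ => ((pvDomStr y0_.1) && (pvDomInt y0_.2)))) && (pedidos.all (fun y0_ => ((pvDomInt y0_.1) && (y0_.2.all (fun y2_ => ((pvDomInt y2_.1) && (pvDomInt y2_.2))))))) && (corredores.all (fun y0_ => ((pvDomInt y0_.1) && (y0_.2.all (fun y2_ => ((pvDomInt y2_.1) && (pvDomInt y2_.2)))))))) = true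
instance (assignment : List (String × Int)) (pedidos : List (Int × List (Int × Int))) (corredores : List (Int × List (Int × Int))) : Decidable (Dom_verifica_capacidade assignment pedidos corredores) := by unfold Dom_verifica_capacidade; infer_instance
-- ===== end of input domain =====

-- B replaces A's per-item rescans of pedidos/corredores by one accumulation pass building
-- demand/offer dictionaries, then a per-item comparison (objective: faster).


-- ===== PORT A =====
-- Python A iterates the pedidos/corredores dicts by key and looks each key up again;
-- d[o] (always a present key) is ported as the total Dict.getD with default [].
-- The early-return loop over the item set is ported as .all (order-independent consumption).
def verifica_capacidade (assignment : List (String × Int)) (pedidos : List (Int × List (Int × Int))) (corredores : List (Int × List (Int × Int))) : Bool :=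
  let asgD : PySem.Dict String Int := PySem.Dict.mk assignment
  let pedD : PySem.Dict Int (List (Int × Int)) := PySem.Dict.mk pedidos
  let corD : PySem.Dict Int (List (Int × Int)) := PySem.Dict.mk corredores
  let itens : PySem.Set Int :=
    pedD.keys.foldl (fun s o => PySem.Set.update s ((pedD.getD o []).map Prod.fst)) PySem.Set.empty
  itens.all (fun item =>
    let demanda : Int :=
      ((pedD.keys.filter (fun o => asgD.getD ("o" ++ PySem.Int.toStr o) 0 == 1)).map
         (fun o => (PySem.Dict.mk (pedD.getD o [])).getD item 0)).sum
    let oferta : Int :=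
      ((corD.keys.filter (fun c => asgD.getD ("c" ++ PySem.Int.toStr c) 0 == 1)).map
         (fun c => (PySem.Dict.mk (corD.getD c [])).getD item 0)).sum
    !(decide (oferta < demanda)))

-- ===== PORT B =====
def verifica_capacidade_alt (assignment : List (String × Int)) (pedidos : List (Int × List (Int × Int))) (corredores : List (Int × List (Int × Int))) : Bool :=
  let asgD : PySem.Dict String Int := PySem.Dict.mk assignment
  let st : PySem.Set Int × PySem.Dict Int Int :=
    pedidos.foldl
      (fun st p =>
        let itens := PySem.Set.update st.1 (p.2.map Prod.fst)
        if asgD.getD ("o" ++ PySem.Int.toStr p.1) 0 == 1 then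
          (itens, p.2.foldl (fun d q => d.insert q.1 (d.getD q.1 0 + q.2)) st.2)
        else (itens, st.2))
      (PySem.Set.empty, PySem.Dict.empty)
  let oferta : PySem.Dict Int Int :=
    corredores.foldl
      (fun d p =>
        if asgD.getD ("c" ++ PySem.Int.toStr p.1) 0 == 1 then
          p.2.foldl (fun d q => d.insert q.1 (d.getD q.1 0 + q.2)) d
        else d)
      PySem.Dict.empty
  st.1.all (fun i => decide (st.2.getD i 0 ≤ oferta.getD i 0))

-- ===== PRECONDITION & SPEC =====
-- Pre_ only excludes association lists with duplicate keys (outer or inner): those do not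
-- correspond to any Python dict, so no input the Python A accepts is excluded.
def Pre_verifica_capacidade (assignment : List (String × Int)) (pedidos : List (Int × List (Int × Int))) (corredores : List (Int × List (Int × Int))) : Prop :=
  (pedidos.map Prod.fst).Nodup ∧ (corredores.map Prod.fst).Nodup ∧
  (∀ p ∈ pedidos, (p.2.map Prod.fst).Nodup) ∧ (∀ p ∈ corredores, (p.2.map Prod.fst).Nodup)
instance (assignment : List (String × Int)) (pedidos : List (Int × List (Int × Int))) (corredores : List (Int × List (Int × Int))) : Decidable (Pre_verifica_capacidade assignment pedidos corredores) := by unfold Pre_verifica_capacidade; infer_instance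
def pvWitness_verifica_capacidade : (List (String × Int)) × (List (Int × List (Int × Int))) × (List (Int × List (Int × Int))) :=
  ([("o1", 1), ("c2", 1)], [(1, [(5, 2)])], [(2, [(5, 3)])])
def Spec_verifica_capacidade (assignment : List (String × Int)) (pedidos : List (Int × List (Int × Int))) (corredores : List (Int × List (Int × Int))) (out : Bool) : Prop := out = verifica_capacidade_alt assignment pedidos corredores
instance (assignment : List (String × Int)) (pedidos : List (Int × List (Int × Int))) (corredores : List (Int × List (Int × Int))) (out : Bool) : Decidable (Spec_verifica_capacidade assignment pedidos corredores out) := by unfold Spec_verifica_capacidade; infer_instance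

-- ===== CLAIM (what is proved, stated in full; the proofs are below) =====
def Claim_equal_verifica_capacidade : Prop := ∀ (assignment : List (String × Int)) (pedidos : List (Int × List (Int × Int))) (corredores : List (Int × List (Int × Int))), Dom_verifica_capacidade assignment pedidos corredores → Pre_verifica_capacidade assignment pedidos corredores → Spec_verifica_capacidade assignment pedidos corredores (verifica_capacidade assignment pedidos corredores)

-- ===== LEMMAS AND PROOFS =====

theorem pv_inner_fold_getD (its : List (Int × Int)) (d : PySem.Dict Int Int) (i : Int) :
    (its.foldl (fun d q => d.insert q.1 (d.getD q.1 0 + q.2)) d).getD i 0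
      = d.getD i 0 + ((its.filter (fun q => q.1 == i)).map Prod.snd).sum := by
  induction its generalizing d with
  | nil => simp
  | cons q t ih =>
    simp only [List.foldl_cons, ih, List.filter_cons]
    rw [PySem.Dict.getD_insert]
    by_cases h : q.1 = i
    · simp [h]; ring
    · simp [h, Ne.symm h, beq_iff_eq]

theorem pv_filter_sum_eq_getD (its : List (Int × Int)) (hn : (its.map Prod.fst).Nodup) (i : Int) :
    ((its.filter (fun q => q.1 == i)).map Prod.snd).sum = (PySem.Dict.mk its).getD i 0 := by
  induction its with
  | nil => simp [PySem.Dict.getD_eq_get?_getD, PySem.Dict.get?]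
  | cons q t ih =>
    simp only [List.map_cons, List.nodup_cons] at hn
    rw [PySem.Dict.getD_eq_get?_getD, PySem.Dict.get?_mk_cons]
    simp only [List.filter_cons]
    by_cases h : q.1 = i
    · have ht : t.filter (fun q => q.1 == i) = [] := by
        apply List.filter_eq_nil_iff.2
        intro p hp hc
        apply hn.1
        subst h
        have : p.1 = q.1 := by simpa using hc
        exact List.mem_map.2 ⟨p, hp, this⟩
      simp [h, ht]
    · simp only [beq_iff_eq, h, if_false]
      rw [← PySem.Dict.getD_eq_get?_getD]
      exact ih hn.2

theorem pv_getD_mk_cons_ne (a : Int × List (Int × Int)) (t : List (Int × List (Int × Int)))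
    (o : Int) (h : a.1 ≠ o) :
    (PySem.Dict.mk (a :: t)).getD o [] = (PySem.Dict.mk t).getD o [] := by
  rw [PySem.Dict.getD_eq_get?_getD, PySem.Dict.getD_eq_get?_getD]
  have : (PySem.Dict.mk (a :: t)).get? o = (PySem.Dict.mk t).get? o := by
    cases a with
    | mk k v => rw [PySem.Dict.get?_mk_cons]; simp [h]
  rw [this]

theorem pv_getD_mk_cons_self (k : Int) (v : List (Int × Int)) (t : List (Int × List (Int × Int))) :
    (PySem.Dict.mk ((k, v) :: t)).getD k [] = v := by
  rw [PySem.Dict.getD_eq_get?_getD, PySem.Dict.get?_mk_cons]; simp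

theorem pv_fold_keys_lookup {β : Type} (l : List (Int × List (Int × Int)))
    (hn : (l.map Prod.fst).Nodup) (f : β → List (Int × Int) → β) (s : β) :
    (l.map (fun x => x.1)).foldl (fun s o => f s ((PySem.Dict.mk l).getD o [])) s
      = l.foldl (fun s p => f s p.2) s := by
  induction l generalizing s with
  | nil => rfl
  | cons a t ih =>
    simp only [List.map_cons, List.nodup_cons] at hn
    obtain ⟨k, v⟩ := a
    simp only [List.map_cons, List.foldl_cons, pv_getD_mk_cons_self]
    rw [PySem.List.foldl_congr_mem (t.map (fun x => x.1))
      (fun s o => f s ((PySem.Dict.mk ((k, v) :: t)).getD o []))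
      (fun s o => f s ((PySem.Dict.mk t).getD o [])) (f s v)
      (by intro acc x hx
          show f acc ((PySem.Dict.mk ((k, v) :: t)).getD x []) = f acc ((PySem.Dict.mk t).getD x [])
          rw [pv_getD_mk_cons_ne]
          exact fun e => hn.1 (e ▸ hx))]
    exact ih hn.2 _

theorem pv_filter_map_keys_lookup (l : List (Int × List (Int × Int)))
    (hn : (l.map Prod.fst).Nodup) (sel : Int → Bool) (g : List (Int × Int) → Int) :
    (((l.map (fun x => x.1)).filter sel).map (fun o => g ((PySem.Dict.mk l).getD o []))).sum
      = ((l.filter (fun p => sel p.1)).map (fun p => g p.2)).sum := by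
  induction l with
  | nil => rfl
  | cons a t ih =>
    simp only [List.map_cons, List.nodup_cons] at hn
    obtain ⟨k, v⟩ := a
    simp only [List.map_cons, List.filter_cons]
    by_cases hs : sel k
    · simp only [hs, if_true, List.map_cons, List.sum_cons, pv_getD_mk_cons_self]
      congr 1
      rw [← ih hn.2]
      apply congrArg
      apply List.map_congr_left
      intro x hx
      rw [pv_getD_mk_cons_ne]
      exact fun e => hn.1 (e ▸ (List.mem_of_mem_filter hx))
    · simp only [hs, Bool.false_eq_true, if_false]
      rw [← ih hn.2]
      apply congrArg
      apply List.map_congr_left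
      intro x hx
      rw [pv_getD_mk_cons_ne]
      exact fun e => hn.1 (e ▸ (List.mem_of_mem_filter hx))

theorem pv_outer_fold_getD (l : List (Int × List (Int × Int))) (sel : Int → Bool)
    (d : PySem.Dict Int Int) (i : Int) :
    (l.foldl (fun d p => if sel p.1 then p.2.foldl (fun d q => d.insert q.1 (d.getD q.1 0 + q.2)) d else d) d).getD i 0
      = d.getD i 0 + ((l.filter (fun p => sel p.1)).map (fun p => ((p.2.filter (fun q => q.1 == i)).map Prod.snd).sum)).sum := by
  induction l generalizing d with
  | nil => simp
  | cons p t ih =>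
    simp only [List.foldl_cons, List.filter_cons]
    by_cases hs : sel p.1
    · simp only [hs, if_true, List.map_cons, List.sum_cons]
      rw [ih, pv_inner_fold_getD]
      ring
    · simp only [hs, Bool.false_eq_true, if_false]
      rw [ih]

theorem pv_bfold_eta (l : List (Int × List (Int × Int))) (sel : Int → Bool)
    (st : PySem.Set Int × PySem.Dict Int Int) :
    l.foldl
      (fun st p =>
        if sel p.1 then
          (PySem.Set.update st.1 (p.2.map Prod.fst), p.2.foldl (fun d q => d.insert q.1 (d.getD q.1 0 + q.2)) st.2)
        else (PySem.Set.update st.1 (p.2.map Prod.fst), st.2)) st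
    = (l.foldl (fun s p => PySem.Set.update s (p.2.map Prod.fst)) st.1,
       l.foldl (fun d p => if sel p.1 then p.2.foldl (fun d q => d.insert q.1 (d.getD q.1 0 + q.2)) d else d) st.2) := by
  induction l generalizing st with
  | nil => rfl
  | cons p t ih =>
    simp only [List.foldl_cons]
    by_cases hs : sel p.1 <;> simp only [hs, if_true] <;> exact ih _


theorem pv_main (assignment : List (String × Int)) (pedidos : List (Int × List (Int × Int))) (corredores : List (Int × List (Int × Int)))
    (hP : (pedidos.map Prod.fst).Nodup) (hC : (corredores.map Prod.fst).Nodup)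
    (hPin : ∀ p ∈ pedidos, (p.2.map Prod.fst).Nodup) (hCin : ∀ p ∈ corredores, (p.2.map Prod.fst).Nodup) :
    verifica_capacidade assignment pedidos corredores = verifica_capacidade_alt assignment pedidos corredores := by
  simp only [verifica_capacidade, verifica_capacidade_alt]
  rw [pv_bfold_eta pedidos (fun o => (PySem.Dict.mk assignment).getD ("o" ++ PySem.Int.toStr o) 0 == 1)]
  rw [PySem.Dict.keys_mk,
      pv_fold_keys_lookup pedidos hP (fun s v => PySem.Set.update s (v.map Prod.fst)) PySem.Set.empty]
  dsimp only
  apply congrArg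
  funext i
  rw [pv_filter_map_keys_lookup pedidos hP _ (fun its => (PySem.Dict.mk its).getD i 0),
      PySem.Dict.keys_mk,
      pv_filter_map_keys_lookup corredores hC _ (fun its => (PySem.Dict.mk its).getD i 0),
      pv_outer_fold_getD pedidos (fun o => (PySem.Dict.mk assignment).getD ("o" ++ PySem.Int.toStr o) 0 == 1),
      pv_outer_fold_getD corredores (fun c => (PySem.Dict.mk assignment).getD ("c" ++ PySem.Int.toStr c) 0 == 1),
      PySem.Dict.getD_empty]
  simp only [zero_add]
  rw [List.map_congr_left (fun p hp => pv_filter_sum_eq_getD p.2 (hPin p (List.mem_of_mem_filter hp)) i),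
      List.map_congr_left (fun p hp => pv_filter_sum_eq_getD p.2 (hCin p (List.mem_of_mem_filter hp)) i)]
  simp [← decide_not, not_lt]


-- ===== VERDICT (by name: the statement is the Claim_ definition above) =====
theorem verifica_capacidade_spec : Claim_equal_verifica_capacidade := by
  intro assignment pedidos corredores _hDom hPre
  obtain ⟨hP, hC, hPin, hCin⟩ := hPre
  exact pv_main assignment pedidos corredores hP hC hPin hCin
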